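-- pv_equiv track=rewrite | github.com/thekarananand/wikiNetes | backend/api/md2html.py | inline_md_to_inline_html
-- ===== SOURCE A (Python) =====
-- def split_and_replace_logic(input_element, delimiter, opening_tag, closing_tag):
--
--     splitted_element_array = input_element.split(delimiter)
--     new_element = ''
--     tag_open = False
--
--     for i in range( len(splitted_element_array) ):
--         new_element += splitted_element_array[i]
--
--         if ( len(splitted_element_array) != i + 1 ):
--             if (tag_open):
--                 new_element += closing_tag
--                 tag_open = False
--             else:
--                 new_element += opening_tag
--                 tag_open = True
--
--     return(new_element)
--
-- def inline_md_to_inline_html(input_array):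
--
--     output_array = []
--
--     for element in input_array:
--
--         new_element = element
--
--         new_element = split_and_replace_logic( new_element, '***', '<em><strong>', '</strong></em>' )
--         new_element = split_and_replace_logic( new_element, '**', '<strong>', '</strong>' )
--         new_element = split_and_replace_logic( new_element, '*' , '<em>', '</em>' )
--         new_element = split_and_replace_logic( new_element, '`' , '<code>', '</code>' )
--
--         output_array.append(new_element)
--
--
--     return(output_array)
-- ===== SOURCE B (Python) =====
-- def _sub_toggle(s, delimiter, opening_tag, closing_tag):
--     # single left-to-right scan: replace each occurrence of the delimiter
--     # with alternating opening/closing tags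
--     out = []
--     i = 0
--     n = len(delimiter)
--     tag_open = False
--     while i < len(s):
--         if s.startswith(delimiter, i):
--             out.append(closing_tag if tag_open else opening_tag)
--             tag_open = not tag_open
--             i += n
--         else:
--             out.append(s[i])
--             i += 1
--     return ''.join(out)
--
-- def inline_md_to_inline_html(input_array):
--     return [
--         _sub_toggle(
--             _sub_toggle(
--                 _sub_toggle(
--                     _sub_toggle(element, '***', '<em><strong>', '</strong></em>'),
--                     '**', '<strong>', '</strong>'),
--                 '*', '<em>', '</em>'),
--             '`', '<code>', '</code>')
--         for element in input_array
--     ]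
-- ===== Notes on version B (the rewrite author's own statement) =====
-- stated objective: alternative
-- what changed: Replaces A's split-into-array-then-index-loop-with-tag_open-flag (per delimiter) by a single left-to-right startswith scan that emits alternating opening/closing tags in place of each delimiter occurrence, building the result in one pass per delimiter.
import Mathlib
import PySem

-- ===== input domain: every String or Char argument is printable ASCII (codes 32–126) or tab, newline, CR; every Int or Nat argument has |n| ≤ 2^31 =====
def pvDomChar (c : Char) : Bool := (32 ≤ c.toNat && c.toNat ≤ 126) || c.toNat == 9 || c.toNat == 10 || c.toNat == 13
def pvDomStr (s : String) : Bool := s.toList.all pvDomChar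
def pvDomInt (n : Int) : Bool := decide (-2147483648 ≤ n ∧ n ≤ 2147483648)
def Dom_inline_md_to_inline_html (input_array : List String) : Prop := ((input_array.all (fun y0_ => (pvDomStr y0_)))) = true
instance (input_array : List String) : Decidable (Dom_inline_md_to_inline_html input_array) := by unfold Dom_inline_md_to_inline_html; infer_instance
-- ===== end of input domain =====

-- B replaces the split-array/index-loop helper by a single left-to-right scan that
-- rewrites each delimiter occurrence with alternating tags (objective: alternative).
-- String work is ported on List Char via PySem.Chars, exact on the stated ASCII domain.

-- ===== PORT A =====
-- literal port of split_and_replace_logic: split, then an index loop over the parts with a tag_open flag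
def split_and_replace_logic (input_element delimiter opening_tag closing_tag : List Char) : List Char :=
  let splitted_element_array := PySem.Chars.splitOn input_element delimiter
  (((PySem.List.pyRange 0 (splitted_element_array.length : Int) 1).foldl
      (fun (st : List Char × Bool) i =>
        let new_element := st.1 ++ PySem.List.pyGetD splitted_element_array i []
        if ((splitted_element_array.length : Int) ≠ i + 1) then
          if st.2 then (new_element ++ closing_tag, false)
          else (new_element ++ opening_tag, true)
        else (new_element, st.2))
      ([], false))).1

def inline_md_to_inline_html (input_array : List String) : List String :=
  input_array.foldl (fun output_array element =>
    let ne0 := element.toList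
    let ne1 := split_and_replace_logic ne0 "***".toList "<em><strong>".toList "</strong></em>".toList
    let ne2 := split_and_replace_logic ne1 "**".toList "<strong>".toList "</strong>".toList
    let ne3 := split_and_replace_logic ne2 "*".toList "<em>".toList "</em>".toList
    let ne4 := split_and_replace_logic ne3 "`".toList "<code>".toList "</code>".toList
    output_array ++ [String.ofList ne4]) []

-- ===== PORT B =====
-- port of _sub_toggle: one scan over the characters; the `delimiter ≠ []` conjunct only
-- guards termination (every call site passes a nonempty delimiter, as in Source B)
def subToggle (delimiter opening_tag closing_tag : List Char) : List Char → Bool → List Char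
  | [], _ => []
  | c :: rest, tag_open =>
    if h : delimiter.isPrefixOf (c :: rest) ∧ delimiter ≠ [] then
      (if tag_open then closing_tag else opening_tag) ++
        subToggle delimiter opening_tag closing_tag ((c :: rest).drop delimiter.length) (!tag_open)
    else
      c :: subToggle delimiter opening_tag closing_tag rest tag_open
termination_by s _ => s.length
decreasing_by
  · simp only [List.length_drop, List.length_cons]
    have : 0 < delimiter.length := List.length_pos_iff.mpr h.2
    omega
  · simp

def inline_md_to_inline_html_alt (input_array : List String) : List String :=
  input_array.map (fun element =>
    String.ofList (subToggle "`".toList "<code>".toList "</code>".toList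
      (subToggle "*".toList "<em>".toList "</em>".toList
        (subToggle "**".toList "<strong>".toList "</strong>".toList
          (subToggle "***".toList "<em><strong>".toList "</strong></em>".toList
            element.toList false) false) false) false))

-- ===== PRECONDITION & SPEC =====
def Spec_inline_md_to_inline_html (input_array : List String) (out : List String) : Prop := out = inline_md_to_inline_html_alt input_array
instance (input_array : List String) (out : List String) : Decidable (Spec_inline_md_to_inline_html input_array out) := by unfold Spec_inline_md_to_inline_html; infer_instance

-- ===== CLAIM (what is proved, stated in full; the proofs are below) =====
def Claim_equal_inline_md_to_inline_html : Prop := ∀ (input_array : List String), Dom_inline_md_to_inline_html input_array → Spec_inline_md_to_inline_html input_array (inline_md_to_inline_html input_array)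

-- ===== LEMMAS AND PROOFS =====

-- clean recursive characterisation of Python's s.split(sep) for sep ≠ []
def splitRec (sep : List Char) : List Char → List (List Char)
  | [] => [[]]
  | c :: rest =>
    if h : sep.isPrefixOf (c :: rest) ∧ sep ≠ [] then
      [] :: splitRec sep ((c :: rest).drop sep.length)
    else
      let r := splitRec sep rest
      (c :: r.headD []) :: r.tail
termination_by l => l.length
decreasing_by
  · simp only [List.length_drop, List.length_cons]
    have : 0 < sep.length := List.length_pos_iff.mpr h.2
    omega
  · simp

theorem splitRec_ne_nil (sep l : List Char) : splitRec sep l ≠ [] := by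
  cases l with
  | nil => simp [splitRec]
  | cons c rest => rw [splitRec]; split <;> simp

-- the join-with-alternating-tags view of A's index loop
def joinAlt (opening_tag closing_tag : List Char) : List (List Char) → Bool → List Char
  | [], _ => []
  | [p], _ => p
  | p :: q :: rest, flag =>
    p ++ (if flag then closing_tag else opening_tag) ++ joinAlt opening_tag closing_tag (q :: rest) (!flag)

theorem go_spec (sep : List Char) (hsep : sep ≠ []) :
    ∀ (fuel : Nat) (l cur : List Char) (accl : List (List Char)),
      l.length < fuel →
      PySem.Chars.splitOn.go sep fuel l cur accl =
        accl.reverse ++ (cur.reverse ++ (splitRec sep l).headD []) :: (splitRec sep l).tail := by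
  intro fuel
  induction fuel with
  | zero => intro l cur accl h; omega
  | succ f ih =>
    intro l cur accl h
    cases l with
    | nil => simp [PySem.Chars.splitOn.go, splitRec]
    | cons ch rest =>
      rw [PySem.Chars.splitOn.go]
      by_cases hp : sep.isPrefixOf (ch :: rest)
      · rw [if_pos hp]
        have hlt : ((ch :: rest).drop sep.length).length < f := by
          have : 0 < sep.length := List.length_pos_iff.mpr hsep
          simp only [List.length_drop, List.length_cons] at *
          omega
        rw [ih _ [] _ hlt]
        rw [splitRec, dif_pos ⟨hp, hsep⟩]
        obtain ⟨h0, t, hst⟩ := List.exists_cons_of_ne_nil (splitRec_ne_nil sep ((ch :: rest).drop sep.length))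
        simp [hst]
      · rw [if_neg hp]
        have hlt : rest.length < f := by simp at h; omega
        rw [ih _ _ _ hlt]
        rw [splitRec, dif_neg (by simp [hp])]
        simp

theorem splitOn_eq_splitRec (sep l : List Char) (hsep : sep ≠ []) :
    PySem.Chars.splitOn l sep = splitRec sep l := by
  rw [PySem.Chars.splitOn, go_spec sep hsep _ _ _ _ (by omega)]
  obtain ⟨h0, t, hst⟩ := List.exists_cons_of_ne_nil (splitRec_ne_nil sep l)
  simp [hst]

theorem subToggle_eq_joinAlt (sep o c : List Char) (hsep : sep ≠ []) :
    ∀ (n : Nat) (l : List Char) (flag : Bool), l.length = n →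
      subToggle sep o c l flag = joinAlt o c (splitRec sep l) flag := by
  intro n
  induction n using Nat.strong_induction_on with
  | _ n ih =>
    intro l flag hn
    cases l with
    | nil => simp [subToggle, splitRec, joinAlt]
    | cons ch rest =>
      rw [subToggle, splitRec]
      by_cases hp : sep.isPrefixOf (ch :: rest)
      · rw [dif_pos ⟨hp, hsep⟩, dif_pos ⟨hp, hsep⟩]
        obtain ⟨h0, t, hst⟩ := List.exists_cons_of_ne_nil (splitRec_ne_nil sep ((ch :: rest).drop sep.length))
        have hlt : ((ch :: rest).drop sep.length).length < n := by
          have : 0 < sep.length := List.length_pos_iff.mpr hsep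
          have hn' : rest.length + 1 = n := by simpa using hn
          simp only [List.length_drop, List.length_cons]
          omega
        rw [ih _ hlt _ (!flag) rfl]
        rw [hst, joinAlt, ← hst]
        simp
      · rw [dif_neg (by simp [hp]), dif_neg (by simp [hp])]
        have hlt : rest.length < n := by simp at hn; omega
        rw [ih _ hlt rest flag rfl]
        obtain ⟨h0, t, hst⟩ := List.exists_cons_of_ne_nil (splitRec_ne_nil sep rest)
        cases t with
        | nil => simp [hst, joinAlt]
        | cons t1 t' => simp [hst, joinAlt]

theorem foldA (o c : List Char) (full : List (List Char)) :
    ∀ (m j : Nat) (acc : List Char) (flag : Bool), full.length - j = m → j ≤ full.length →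
      ((PySem.List.pyRange (j : Int) (full.length : Int) 1).foldl
        (fun (st : List Char × Bool) i =>
          let new_element := st.1 ++ PySem.List.pyGetD full i []
          if ((full.length : Int) ≠ i + 1) then
            if st.2 then (new_element ++ c, false)
            else (new_element ++ o, true)
          else (new_element, st.2))
        (acc, flag)).1 = acc ++ joinAlt o c (full.drop j) flag := by
  intro m
  induction m with
  | zero =>
    intro j acc flag hm hj
    have hj' : j = full.length := by omega
    subst hj'
    simp [PySem.List.pyRange, joinAlt]
  | succ m ih =>
    intro j acc flag hm hj
    have hjlt : j < full.length := by omega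
    rw [PySem.List.pyRange_one_cons (by exact_mod_cast hjlt)]
    rw [List.foldl_cons]
    have hget : PySem.List.pyGetD full (j : Int) [] = full[j] := by
      rw [PySem.List.pyGetD_natCast]
      exact List.getD_eq_getElem full [] hjlt
    have hdrop : full.drop j = full[j] :: full.drop (j + 1) := (List.getElem_cons_drop hjlt).symm
    have hcast : ((j : Int) + 1) = ((j + 1 : Nat) : Int) := by push_cast; ring
    by_cases hlast : full.length = j + 1
    · have hcond : ¬ ((full.length : Int) ≠ (j : Int) + 1) := by omega
      simp only [hget, if_neg hcond]
      rw [hcast, ih (j+1) _ _ (by omega) (by omega)]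
      have : full.drop (j+1) = [] := List.drop_eq_nil_of_le (by omega)
      rw [hdrop, this, joinAlt, joinAlt]
      simp
    · have hcond : ((full.length : Int) ≠ (j : Int) + 1) := by omega
      simp only [hget, if_pos hcond]
      obtain ⟨q, t, hqt⟩ := List.exists_cons_of_ne_nil
        (show full.drop (j+1) ≠ [] by
          intro hnil
          have := List.drop_eq_nil_iff.mp hnil
          omega)
      cases flag with
      | false =>
        rw [hcast, ih (j+1) _ _ (by omega) (by omega)]
        rw [hdrop, hqt, joinAlt, ← hqt]
        simp
      | true =>
        rw [hcast, ih (j+1) _ _ (by omega) (by omega)]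
        rw [hdrop, hqt, joinAlt, ← hqt]
        simp

theorem helper_eq (e d o c : List Char) (hd : d ≠ []) :
    split_and_replace_logic e d o c = subToggle d o c e false := by
  unfold split_and_replace_logic
  have h0 : ((0 : Int)) = ((0 : Nat) : Int) := by norm_num
  rw [h0, foldA o c (PySem.Chars.splitOn e d) (PySem.Chars.splitOn e d).length 0 [] false rfl (by omega)]
  rw [List.drop_zero, List.nil_append]
  rw [splitOn_eq_splitRec d e hd]
  exact (subToggle_eq_joinAlt d o c hd e.length e false rfl).symm

-- ===== VERDICT (by name: the statement is the Claim_ definition above) =====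
theorem inline_md_to_inline_html_spec : Claim_equal_inline_md_to_inline_html := by
  intro input_array _
  unfold Spec_inline_md_to_inline_html inline_md_to_inline_html inline_md_to_inline_html_alt
  rw [PySem.List.foldl_append_singleton_eq_map, List.nil_append]
  apply List.map_congr_left
  intro element _
  rw [helper_eq _ _ _ _ (by decide), helper_eq _ _ _ _ (by decide),
      helper_eq _ _ _ _ (by decide), helper_eq _ _ _ _ (by decide)]
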